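-- pv_equiv track=rewrite | github.com/Harshitjoshi133/DeepShiva | server/app/routers/chat.py | _generate_suggested_actions
-- ===== SOURCE A (Python) =====
-- from typing import List, Optional, Dict, Any
--
-- def _generate_suggested_actions(message: str, response: str) -> List[str]:
--     """Generate suggested actions based on message and response"""
--     message_lower = message.lower()
--     response_lower = response.lower()
--
--     suggestions = []
--
--     # Context-based suggestions
--     if any(word in message_lower for word in ["weather", "temperature", "climate"]):
--         suggestions.extend(["Check current weather", "View 7-day forecast", "Pack weather-appropriate gear"])
--
--     if any(word in message_lower for word in ["route", "travel", "journey", "how to reach"]):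
--         suggestions.extend(["Calculate carbon footprint", "Find accommodation", "Check road conditions"])
--
--     if any(word in message_lower for word in ["kedarnath", "badrinath", "gangotri", "yamunotri"]):
--         suggestions.extend(["Check crowd status", "View shrine timings", "Book helicopter tickets"])
--
--     if any(word in message_lower for word in ["stay", "hotel", "accommodation"]):
--         suggestions.extend(["Find nearby hotels", "Check availability", "Read reviews"])
--
--     if any(word in message_lower for word in ["yoga", "meditation", "spiritual"]):
--         suggestions.extend(["Try yoga poses", "Find meditation centers", "Learn breathing techniques"])
--
--     # Default suggestions if none match
--     if not suggestions:
--         suggestions = ["Ask about Char Dham", "Check weather conditions", "Plan your journey"]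
--
--     return suggestions[:3]  # Return top 3 suggestions
-- ===== SOURCE B (Python) =====
-- from typing import List
--
-- _ACTION_TABLE = [
--     (("weather", "temperature", "climate"),
--      ["Check current weather", "View 7-day forecast", "Pack weather-appropriate gear"]),
--     (("route", "travel", "journey", "how to reach"),
--      ["Calculate carbon footprint", "Find accommodation", "Check road conditions"]),
--     (("kedarnath", "badrinath", "gangotri", "yamunotri"),
--      ["Check crowd status", "View shrine timings", "Book helicopter tickets"]),
--     (("stay", "hotel", "accommodation"),
--      ["Find nearby hotels", "Check availability", "Read reviews"]),
--     (("yoga", "meditation", "spiritual"),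
--      ["Try yoga poses", "Find meditation centers", "Learn breathing techniques"]),
-- ]
--
-- def _generate_suggested_actions(message: str, response: str) -> List[str]:
--     """First matching keyword group wins: each group carries exactly 3 actions,
--     so A's accumulate-then-[:3] always returns the first matching group."""
--     message_lower = message.lower()
--     for keywords, actions in _ACTION_TABLE:
--         if any(word in message_lower for word in keywords):
--             return actions
--     return ["Ask about Char Dham", "Check weather conditions", "Plan your journey"]
-- ===== Notes on version B (the rewrite author's own statement) =====
-- stated objective: simpler
-- what changed: Replaces the accumulate-all-matching-groups-then-slice-[:3] chain of ifs with a single keyword table scanned once, returning the first matching group's three actions immediately (valid because every group has exactly three actions).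
import Mathlib
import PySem

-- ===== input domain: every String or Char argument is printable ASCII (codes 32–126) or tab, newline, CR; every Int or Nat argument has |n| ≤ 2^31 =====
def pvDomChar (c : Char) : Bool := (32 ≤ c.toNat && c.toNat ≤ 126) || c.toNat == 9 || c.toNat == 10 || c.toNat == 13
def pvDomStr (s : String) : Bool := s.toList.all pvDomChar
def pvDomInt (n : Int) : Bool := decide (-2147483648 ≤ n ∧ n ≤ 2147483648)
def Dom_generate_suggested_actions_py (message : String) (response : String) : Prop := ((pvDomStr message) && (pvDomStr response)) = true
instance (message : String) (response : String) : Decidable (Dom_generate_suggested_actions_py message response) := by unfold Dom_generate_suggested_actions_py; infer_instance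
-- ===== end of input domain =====

-- B replaces A's accumulate-all-matching-groups-then-[:3] with a first-match table lookup (each group has exactly 3 actions); objective: simpler.

-- ===== PORT A =====
def generate_suggested_actions_py (message : String) (response : String) : List String :=
  let message_lower := PySem.Str.lower message
  let _response_lower := PySem.Str.lower response
  let suggestions : List String := []
  let suggestions := if ["weather", "temperature", "climate"].any (fun word => PySem.Str.isIn word message_lower)
    then suggestions ++ ["Check current weather", "View 7-day forecast", "Pack weather-appropriate gear"] else suggestions
  let suggestions := if ["route", "travel", "journey", "how to reach"].any (fun word => PySem.Str.isIn word message_lower)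
    then suggestions ++ ["Calculate carbon footprint", "Find accommodation", "Check road conditions"] else suggestions
  let suggestions := if ["kedarnath", "badrinath", "gangotri", "yamunotri"].any (fun word => PySem.Str.isIn word message_lower)
    then suggestions ++ ["Check crowd status", "View shrine timings", "Book helicopter tickets"] else suggestions
  let suggestions := if ["stay", "hotel", "accommodation"].any (fun word => PySem.Str.isIn word message_lower)
    then suggestions ++ ["Find nearby hotels", "Check availability", "Read reviews"] else suggestions
  let suggestions := if ["yoga", "meditation", "spiritual"].any (fun word => PySem.Str.isIn word message_lower)
    then suggestions ++ ["Try yoga poses", "Find meditation centers", "Learn breathing techniques"] else suggestions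
  let suggestions := if suggestions = [] then ["Ask about Char Dham", "Check weather conditions", "Plan your journey"] else suggestions
  PySem.List.slice suggestions none (some 3)

-- ===== PORT B =====
def pvActionTable : List (List String × List String) :=
  [ (["weather", "temperature", "climate"],
     ["Check current weather", "View 7-day forecast", "Pack weather-appropriate gear"]),
    (["route", "travel", "journey", "how to reach"],
     ["Calculate carbon footprint", "Find accommodation", "Check road conditions"]),
    (["kedarnath", "badrinath", "gangotri", "yamunotri"],
     ["Check crowd status", "View shrine timings", "Book helicopter tickets"]),
    (["stay", "hotel", "accommodation"],
     ["Find nearby hotels", "Check availability", "Read reviews"]),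
    (["yoga", "meditation", "spiritual"],
     ["Try yoga poses", "Find meditation centers", "Learn breathing techniques"]) ]

def generate_suggested_actions_py_alt (message : String) (response : String) : List String :=
  let message_lower := PySem.Str.lower message
  match pvActionTable.find? (fun p => p.1.any (fun word => PySem.Str.isIn word message_lower)) with
  | some p => p.2
  | none => ["Ask about Char Dham", "Check weather conditions", "Plan your journey"]

-- ===== PRECONDITION & SPEC =====
def Spec_generate_suggested_actions_py (message : String) (response : String) (out : List String) : Prop := out = generate_suggested_actions_py_alt message response
instance (message : String) (response : String) (out : List String) : Decidable (Spec_generate_suggested_actions_py message response out) := by unfold Spec_generate_suggested_actions_py; infer_instance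

-- ===== CLAIM (what is proved, stated in full; the proofs are below) =====
def Claim_equal_generate_suggested_actions_py : Prop := ∀ (message : String) (response : String), Dom_generate_suggested_actions_py message response → Spec_generate_suggested_actions_py message response (generate_suggested_actions_py message response)

-- ===== LEMMAS AND PROOFS =====

-- ===== VERDICT (by name: the statement is the Claim_ definition above) =====
theorem generate_suggested_actions_py_spec : Claim_equal_generate_suggested_actions_py := by
  intro message response _
  show _ = _
  unfold generate_suggested_actions_py generate_suggested_actions_py_alt pvActionTable
  set ml := PySem.Str.lower message with hml
  cases h1 : ["weather", "temperature", "climate"].any (fun word => PySem.Str.isIn word ml) <;>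
  cases h2 : ["route", "travel", "journey", "how to reach"].any (fun word => PySem.Str.isIn word ml) <;>
  cases h3 : ["kedarnath", "badrinath", "gangotri", "yamunotri"].any (fun word => PySem.Str.isIn word ml) <;>
  cases h4 : ["stay", "hotel", "accommodation"].any (fun word => PySem.Str.isIn word ml) <;>
  cases h5 : ["yoga", "meditation", "spiritual"].any (fun word => PySem.Str.isIn word ml) <;>
  simp only [List.find?, h1, h2, h3, h4, h5] <;>
  simp [PySem.List.slice, PySem.List.clampIdx]
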